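-- pv_equiv track=rewrite | github.com/VLD62/PythonFundamentals | 00.EXAMS/Exam Preparation l/tempCodeRunnerFile.py | max_element_index
-- ===== SOURCE A (Python) =====
-- def max_element_index(array):
--     max_element = array[0]
--     even_odd_index = {"even": 0, "odd": 0}
--     for idx, element in enumerate(array):
--         if element >= max_element and element % 2 == 0:
--             even_odd_index['even'] = idx
--
--         if element >= max_element and element % 2 == 1:
--             even_odd_index['odd'] = idx
--     return even_odd_index
-- ===== SOURCE B (Python) =====
-- def max_element_index(array):
--     threshold = array[0]
--     result = {"even": 0, "odd": 0}
--     found_even = False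
--     found_odd = False
--     for idx in range(len(array) - 1, -1, -1):
--         element = array[idx]
--         if element >= threshold and element % 2 == 0 and not found_even:
--             result["even"] = idx
--             found_even = True
--         elif element >= threshold and element % 2 == 1 and not found_odd:
--             result["odd"] = idx
--             found_odd = True
--         if found_even and found_odd:
--             break
--     return result
-- ===== Notes on version B (the rewrite author's own statement) =====
-- stated objective: alternative
-- what changed: A does a forward full pass updating a dict at every match; B computes the first-element threshold once and scans backwards with found-flags, recording only the first (i.e. last-index) even and odd match and breaking early once both are found.
import Mathlib
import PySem

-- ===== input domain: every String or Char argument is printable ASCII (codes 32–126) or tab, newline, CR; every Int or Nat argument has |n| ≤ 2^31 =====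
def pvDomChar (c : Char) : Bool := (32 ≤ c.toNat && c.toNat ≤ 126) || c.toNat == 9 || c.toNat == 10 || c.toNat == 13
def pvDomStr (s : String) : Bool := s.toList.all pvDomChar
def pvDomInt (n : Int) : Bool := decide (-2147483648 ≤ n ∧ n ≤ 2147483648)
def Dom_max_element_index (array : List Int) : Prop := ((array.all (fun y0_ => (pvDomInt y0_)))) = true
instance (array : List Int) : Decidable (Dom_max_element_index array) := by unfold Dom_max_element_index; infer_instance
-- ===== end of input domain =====

-- B replaces A's forward full-pass dict updates by a reverse scan with found-flags and
-- early exit, returning the same last matching indices (objective: alternative).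

-- ===== PORT A =====
def max_element_index (array : List Int) : List (String × Int) :=
  match PySem.List.pyGet? array 0 with
  | none => []   -- array[0] raises IndexError on []; excluded by Pre_
  | some max_element =>
    ((PySem.List.enumerate array).foldl
      (fun d (p : Int × Int) =>
        let d1 := if p.2 ≥ max_element ∧ PySem.Int.mod p.2 2 = 0 then d.insert "even" p.1 else d
        if p.2 ≥ max_element ∧ PySem.Int.mod p.2 2 = 1 then d1.insert "odd" p.1 else d1)
      (PySem.Dict.ofList [("even", 0), ("odd", 0)])).items

-- ===== PORT B =====
def altLoop (array : List Int) (t : Int) : Nat → Int → Int → Bool → Bool → Int × Int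
  | 0, re, ro, _, _ => (re, ro)
  | i+1, re, ro, fe, fo =>
    let e := array.getD i 0
    let s : Int × Int × Bool × Bool :=
      if e ≥ t ∧ PySem.Int.mod e 2 = 0 ∧ fe = false then ((i : Int), ro, true, fo)
      else if e ≥ t ∧ PySem.Int.mod e 2 = 1 ∧ fo = false then (re, (i : Int), fe, true)
      else (re, ro, fe, fo)
    if s.2.2.1 && s.2.2.2 then (s.1, s.2.1)
    else altLoop array t i s.1 s.2.1 s.2.2.1 s.2.2.2

def max_element_index_alt (array : List Int) : List (String × Int) :=
  match PySem.List.pyGet? array 0 with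
  | none => []
  | some threshold =>
    let r := altLoop array threshold array.length 0 0 false false
    [("even", r.1), ("odd", r.2)]


-- ===== PRECONDITION & SPEC =====
-- Pre_ excludes only the empty list, on which A raises IndexError at its first-element access (B raises there too).
def Pre_max_element_index (array : List Int) : Prop := array ≠ []
instance (array : List Int) : Decidable (Pre_max_element_index array) := by unfold Pre_max_element_index; infer_instance
def pvWitness_max_element_index : List Int := [2, 3, 4]

def Spec_max_element_index (array : List Int) (out : List (String × Int)) : Prop := out = max_element_index_alt array
instance (array : List Int) (out : List (String × Int)) : Decidable (Spec_max_element_index array out) := by unfold Spec_max_element_index; infer_instance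

-- ===== CLAIM (what is proved, stated in full; the proofs are below) =====
def Claim_equal_max_element_index : Prop := ∀ (array : List Int), Dom_max_element_index array → Pre_max_element_index array → Spec_max_element_index array (max_element_index array)

-- ===== LEMMAS AND PROOFS =====
-- proof helpers (used only by the proofs below)
def fwdP (p : Int → Prop) [DecidablePred p] : List Int → Int → Int → Int
  | [], _, acc => acc
  | e :: xs, s, acc => fwdP p xs (s+1) (if p e then s else acc)

def downP (p : Int → Prop) [DecidablePred p] (l : List Int) : Nat → Int
  | 0 => 0
  | i+1 => if p (l.getD i 0) then (i : Int) else downP p l i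

lemma foldA (t : Int) (xs : List Int) : ∀ (s : Int) (a b : Int),
  (PySem.List.enumerate xs s).foldl
      (fun d (p : Int × Int) =>
        let d1 := if p.2 ≥ t ∧ PySem.Int.mod p.2 2 = 0 then d.insert "even" p.1 else d
        if p.2 ≥ t ∧ PySem.Int.mod p.2 2 = 1 then d1.insert "odd" p.1 else d1)
      (PySem.Dict.mk [("even", a), ("odd", b)])
  = PySem.Dict.mk [("even", fwdP (fun e => e ≥ t ∧ PySem.Int.mod e 2 = 0) xs s a),
                   ("odd",  fwdP (fun e => e ≥ t ∧ PySem.Int.mod e 2 = 1) xs s b)] := by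
  induction xs with
  | nil => intro s a b; simp [PySem.List.enumerate_nil, fwdP]
  | cons x xs ih =>
    intro s a b
    rw [PySem.List.enumerate_cons, List.foldl_cons]
    have hstep : (let d1 := if (s, x).2 ≥ t ∧ PySem.Int.mod (s, x).2 2 = 0 then
            (PySem.Dict.mk [("even", a), ("odd", b)]).insert "even" (s, x).1
          else PySem.Dict.mk [("even", a), ("odd", b)];
        if (s, x).2 ≥ t ∧ PySem.Int.mod (s, x).2 2 = 1 then d1.insert "odd" (s, x).1 else d1)
        = PySem.Dict.mk [("even", if (s, x).2 ≥ t ∧ PySem.Int.mod (s, x).2 2 = 0 then (s, x).1 else a),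
                         ("odd",  if (s, x).2 ≥ t ∧ PySem.Int.mod (s, x).2 2 = 1 then (s, x).1 else b)] := by
      split_ifs <;> rfl
    rw [hstep, ih]
    rfl

lemma fwdP_append (p : Int → Prop) [DecidablePred p] (y : Int) :
    ∀ (ys : List Int) (s acc : Int),
    fwdP p (ys ++ [y]) s acc = if p y then s + ys.length else fwdP p ys s acc := by
  intro ys
  induction ys with
  | nil => intro s acc; simp [fwdP]
  | cons x ys ih =>
    intro s acc
    show fwdP p (ys ++ [y]) (s+1) (if p x then s else acc) = _
    rw [ih]
    by_cases hy : p y <;> simp [hy, fwdP]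
    ring

lemma downP_prefix (p : Int → Prop) [DecidablePred p] (ys : List Int) (y : Int) :
    ∀ i, i ≤ ys.length → downP p (ys ++ [y]) i = downP p ys i := by
  intro i
  induction i with
  | zero => intro _; rfl
  | succ i ih =>
    intro hi
    show (if p ((ys ++ [y]).getD i 0) then (i : Int) else downP p (ys ++ [y]) i) = _
    rw [List.getD_append ys [y] 0 i (by omega), ih (by omega)]
    rfl

lemma fwd_eq_down (p : Int → Prop) [DecidablePred p] (l : List Int) :
    fwdP p l 0 0 = downP p l l.length := by
  induction l using List.reverseRecOn with
  | nil => rfl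
  | append_singleton ys y ih =>
    rw [fwdP_append]
    have hlen : (ys ++ [y]).length = ys.length + 1 := by simp
    rw [hlen]
    show _ = (if p ((ys ++ [y]).getD ys.length 0) then (ys.length : Int) else downP p (ys ++ [y]) ys.length)
    rw [show (ys ++ [y]).getD ys.length 0 = y from by simp [List.getD],
        downP_prefix p ys y ys.length le_rfl, ← ih]
    by_cases hy : p y <;> simp [hy]





lemma altLoop_break (array : List Int) (t : Int) (i : Nat) (re ro : Int) :
    altLoop array t i re ro true true = (re, ro) := by
  cases i <;> simp [altLoop]

lemma altLoop_eq (array : List Int) (t : Int) :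
    ∀ (i : Nat) (re ro : Int) (fe fo : Bool),
    (fe = false → re = 0) → (fo = false → ro = 0) →
    altLoop array t i re ro fe fo =
      ((if fe then re else downP (fun e => e ≥ t ∧ PySem.Int.mod e 2 = 0) array i),
       (if fo then ro else downP (fun e => e ≥ t ∧ PySem.Int.mod e 2 = 1) array i)) := by
  intro i
  induction i with
  | zero =>
    intro re ro fe fo hre hro
    cases fe <;> cases fo <;> simp_all [altLoop, downP]
  | succ i ih =>
    intro re ro fe fo hre hro
    have hun : ∀ (re ro : Int) (fe fo : Bool), altLoop array t (i+1) re ro fe fo =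
        (if ((if array.getD i 0 ≥ t ∧ PySem.Int.mod (array.getD i 0) 2 = 0 ∧ fe = false then ((i : Int), ro, true, fo) else if array.getD i 0 ≥ t ∧ PySem.Int.mod (array.getD i 0) 2 = 1 ∧ fo = false then (re, (i : Int), fe, true) else (re, ro, fe, fo)).2.2.1 && (if array.getD i 0 ≥ t ∧ PySem.Int.mod (array.getD i 0) 2 = 0 ∧ fe = false then ((i : Int), ro, true, fo) else if array.getD i 0 ≥ t ∧ PySem.Int.mod (array.getD i 0) 2 = 1 ∧ fo = false then (re, (i : Int), fe, true) else (re, ro, fe, fo)).2.2.2) = true then ((if array.getD i 0 ≥ t ∧ PySem.Int.mod (array.getD i 0) 2 = 0 ∧ fe = false then ((i : Int), ro, true, fo) else if array.getD i 0 ≥ t ∧ PySem.Int.mod (array.getD i 0) 2 = 1 ∧ fo = false then (re, (i : Int), fe, true) else (re, ro, fe, fo)).1, (if array.getD i 0 ≥ t ∧ PySem.Int.mod (array.getD i 0) 2 = 0 ∧ fe = false then ((i : Int), ro, true, fo) else if array.getD i 0 ≥ t ∧ PySem.Int.mod (array.getD i 0) 2 = 1 ∧ fo = false then (re, (i : Int),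 fe, true) else (re, ro, fe, fo)).2.1)
         else altLoop array t i (if array.getD i 0 ≥ t ∧ PySem.Int.mod (array.getD i 0) 2 = 0 ∧ fe = false then ((i : Int), ro, true, fo) else if array.getD i 0 ≥ t ∧ PySem.Int.mod (array.getD i 0) 2 = 1 ∧ fo = false then (re, (i : Int), fe, true) else (re, ro, fe, fo)).1 (if array.getD i 0 ≥ t ∧ PySem.Int.mod (array.getD i 0) 2 = 0 ∧ fe = false then ((i : Int), ro, true, fo) else if array.getD i 0 ≥ t ∧ PySem.Int.mod (array.getD i 0) 2 = 1 ∧ fo = false then (re, (i : Int), fe, true) else (re, ro, fe, fo)).2.1 (if array.getD i 0 ≥ t ∧ PySem.Int.mod (array.getD i 0) 2 = 0 ∧ fe = false then ((i : Int), ro, true, fo) else if array.getD i 0 ≥ t ∧ PySem.Int.mod (array.getD i 0) 2 = 1 ∧ fo = false then (re, (i : Int), fe, true) else (re, ro, fe, fo)).2.2.1 (if array.getD i 0 ≥ t ∧ PySem.Int.mod (array.getD i 0) 2 = 0 ∧ fe = false then ((i : Int), ro, true, fo) else if array.getD i 0 ≥ t ∧ PySem.Int.mod (array.getD i 0) 2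 = 1 ∧ fo = false then (re, (i : Int), fe, true) else (re, ro, fe, fo)).2.2.2) :=
      fun _ _ _ _ => rfl
    by_cases hpe : array.getD i 0 ≥ t ∧ PySem.Int.mod (array.getD i 0) 2 = 0
    · have hpo : ¬ (array.getD i 0 ≥ t ∧ PySem.Int.mod (array.getD i 0) 2 = 1) := by
        intro h; omega
      have hdE : downP (fun e => e ≥ t ∧ PySem.Int.mod e 2 = 0) array (i+1) = (i : Int) := by
        simp only [downP]; rw [if_pos hpe]
      have hdO : downP (fun e => e ≥ t ∧ PySem.Int.mod e 2 = 1) array (i+1)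
          = downP (fun e => e ≥ t ∧ PySem.Int.mod e 2 = 1) array i := by
        simp only [downP]; rw [if_neg hpo]
      rw [hdE, hdO]
      cases fe
      · cases fo
        · rw [hun, if_pos (show array.getD i 0 ≥ t ∧ PySem.Int.mod (array.getD i 0) 2 = 0 ∧ (false : Bool) = false from ⟨hpe.1, hpe.2, rfl⟩)]
          show altLoop array t i (i : Int) ro true false = _
          rw [ih (i : Int) ro true false (fun h => by cases h) hro]
          rfl
        · rw [hun, if_pos (show array.getD i 0 ≥ t ∧ PySem.Int.mod (array.getD i 0) 2 = 0 ∧ (false : Bool) = false from ⟨hpe.1, hpe.2, rfl⟩)]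
          rfl
      · cases fo
        · rw [hun, if_neg (show ¬(array.getD i 0 ≥ t ∧ PySem.Int.mod (array.getD i 0) 2 = 0 ∧ (true : Bool) = false) from fun h => Bool.noConfusion h.2.2), if_neg (show ¬(array.getD i 0 ≥ t ∧ PySem.Int.mod (array.getD i 0) 2 = 1 ∧ (false : Bool) = false) from fun h => hpo ⟨h.1, h.2.1⟩)]
          show altLoop array t i re ro true false = _
          rw [ih re ro true false (fun h => by cases h) hro]
          rfl
        · rw [altLoop_break]
          rfl
    · have hdE : downP (fun e => e ≥ t ∧ PySem.Int.mod e 2 = 0) array (i+1)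
          = downP (fun e => e ≥ t ∧ PySem.Int.mod e 2 = 0) array i := by
        simp only [downP]; rw [if_neg hpe]
      rw [hdE]
      by_cases hpo : array.getD i 0 ≥ t ∧ PySem.Int.mod (array.getD i 0) 2 = 1
      · have hdO : downP (fun e => e ≥ t ∧ PySem.Int.mod e 2 = 1) array (i+1) = (i : Int) := by
          simp only [downP]; rw [if_pos hpo]
        rw [hdO]
        cases fo
        · cases fe
          · rw [hun, if_neg (show ¬(array.getD i 0 ≥ t ∧ PySem.Int.mod (array.getD i 0) 2 = 0 ∧ (false : Bool) = false) from fun h => hpe ⟨h.1, h.2.1⟩), if_pos (show array.getD i 0 ≥ t ∧ PySem.Int.mod (array.getD i 0) 2 = 1 ∧ (false : Bool) = false from ⟨hpo.1, hpo.2, rfl⟩)]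
            show altLoop array t i re (i : Int) false true = _
            rw [ih re (i : Int) false true hre (fun h => by cases h)]
            rfl
          · rw [hun, if_neg (show ¬(array.getD i 0 ≥ t ∧ PySem.Int.mod (array.getD i 0) 2 = 0 ∧ (true : Bool) = false) from fun h => Bool.noConfusion h.2.2), if_pos (show array.getD i 0 ≥ t ∧ PySem.Int.mod (array.getD i 0) 2 = 1 ∧ (false : Bool) = false from ⟨hpo.1, hpo.2, rfl⟩)]
            rfl
        · cases fe
          · rw [hun, if_neg (show ¬(array.getD i 0 ≥ t ∧ PySem.Int.mod (array.getD i 0) 2 = 0 ∧ (false : Bool) = false) from fun h => hpe ⟨h.1, h.2.1⟩), if_neg (show ¬(array.getD i 0 ≥ t ∧ PySem.Int.mod (array.getD i 0) 2 = 1 ∧ (true : Bool) = false) from fun h => Bool.noConfusion h.2.2)]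
            show altLoop array t i re ro false true = _
            rw [ih re ro false true hre (fun h => by cases h)]
            rfl
          · rw [altLoop_break]
            rfl
      · have hdO : downP (fun e => e ≥ t ∧ PySem.Int.mod e 2 = 1) array (i+1)
            = downP (fun e => e ≥ t ∧ PySem.Int.mod e 2 = 1) array i := by
          simp only [downP]; rw [if_neg hpo]
        rw [hdO]
        cases fe <;> cases fo
        · rw [hun, if_neg (show ¬(array.getD i 0 ≥ t ∧ PySem.Int.mod (array.getD i 0) 2 = 0 ∧ (false : Bool) = false) from fun h => hpe ⟨h.1, h.2.1⟩), if_neg (show ¬(array.getD i 0 ≥ t ∧ PySem.Int.mod (array.getD i 0) 2 = 1 ∧ (false : Bool) = false) from fun h => hpo ⟨h.1, h.2.1⟩)]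
          show altLoop array t i re ro false false = _
          rw [ih re ro false false hre hro]
        · rw [hun, if_neg (show ¬(array.getD i 0 ≥ t ∧ PySem.Int.mod (array.getD i 0) 2 = 0 ∧ (false : Bool) = false) from fun h => hpe ⟨h.1, h.2.1⟩), if_neg (show ¬(array.getD i 0 ≥ t ∧ PySem.Int.mod (array.getD i 0) 2 = 1 ∧ (true : Bool) = false) from fun h => Bool.noConfusion h.2.2)]
          show altLoop array t i re ro false true = _
          rw [ih re ro false true hre hro]
        · rw [hun, if_neg (show ¬(array.getD i 0 ≥ t ∧ PySem.Int.mod (array.getD i 0) 2 = 0 ∧ (true : Bool) = false) from fun h => Bool.noConfusion h.2.2), if_neg (show ¬(array.getD i 0 ≥ t ∧ PySem.Int.mod (array.getD i 0) 2 = 1 ∧ (false : Bool) = false) from fun h => hpo ⟨h.1, h.2.1⟩)]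
          show altLoop array t i re ro true false = _
          rw [ih re ro true false hre hro]
        · rw [altLoop_break]
          rfl

lemma A_closed (x : Int) (xs : List Int) :
    max_element_index (x :: xs) =
      [("even", fwdP (fun e => e ≥ x ∧ PySem.Int.mod e 2 = 0) (x :: xs) 0 0),
       ("odd",  fwdP (fun e => e ≥ x ∧ PySem.Int.mod e 2 = 1) (x :: xs) 0 0)] := by
  unfold max_element_index
  rw [show PySem.List.pyGet? (x :: xs) 0 = some x from by simp [pysem]]
  show ((PySem.List.enumerate (x :: xs)).foldl
      (fun d (p : Int × Int) =>
        let d1 := if p.2 ≥ x ∧ PySem.Int.mod p.2 2 = 0 then d.insert "even" p.1 else d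
        if p.2 ≥ x ∧ PySem.Int.mod p.2 2 = 1 then d1.insert "odd" p.1 else d1)
      (PySem.Dict.mk [("even", 0), ("odd", 0)])).items = _
  rw [foldA x (x :: xs) 0 0 0]

lemma B_closed (x : Int) (xs : List Int) :
    max_element_index_alt (x :: xs) =
      [("even", downP (fun e => e ≥ x ∧ PySem.Int.mod e 2 = 0) (x :: xs) (x :: xs).length),
       ("odd",  downP (fun e => e ≥ x ∧ PySem.Int.mod e 2 = 1) (x :: xs) (x :: xs).length)] := by
  unfold max_element_index_alt
  rw [show PySem.List.pyGet? (x :: xs) 0 = some x from by simp [pysem]]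
  show [("even", (altLoop (x :: xs) x (x :: xs).length 0 0 false false).1),
        ("odd",  (altLoop (x :: xs) x (x :: xs).length 0 0 false false).2)] = _
  rw [altLoop_eq (x :: xs) x (x :: xs).length 0 0 false false (fun _ => rfl) (fun _ => rfl)]
  rfl

-- ===== VERDICT (by name: the statement is the Claim_ definition above) =====
theorem max_element_index_spec : Claim_equal_max_element_index := by
  intro array hdom hpre
  unfold Spec_max_element_index
  obtain ⟨x, xs, rfl⟩ : ∃ x xs, array = x :: xs := by
    cases array with
    | nil => exact absurd rfl hpre
    | cons x xs => exact ⟨x, xs, rfl⟩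
  rw [A_closed, B_closed, fwd_eq_down, fwd_eq_down]
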